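-- pv_equiv track=rewrite | github.com/singleron-RD/CeleScope | celescope/tools/barcode.py | check_seq_mismatch
-- ===== SOURCE A (Python) =====
-- def check_seq_mismatch(seq_list, raw_list, mismatch_list):
--     """
--     Returns
--         valid: True if seq in mismatch_list or mismatch_list is empty
--         corrected: True if seq in mismatch_list but not in raw_list
--         res: joined seq
--
--     >>> seq_list = ['ATA', 'AAT', 'ATA']
--     >>> correct_set_list = [{'AAA'},{'AAA'},{'AAA'}]
--     >>> mismatch_dict_list = [create_mismatch_origin_dict(['AAA'])] * 3
--
--     >>> check_seq_mismatch(seq_list, correct_set_list, mismatch_dict_list)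
--     (True, True, 'AAAAAAAAA')
--
--     >>> seq_list = ['AAA', 'AAA', 'AAA']
--     >>> check_seq_mismatch(seq_list, correct_set_list, mismatch_dict_list)
--     (True, False, 'AAAAAAAAA')
--
--     >>> seq_list = ['AAA', 'AAA', 'AAA']
--     >>> raw_list, mismatch_list = [], []
--     >>> check_seq_mismatch(seq_list, raw_list, mismatch_list)
--     (True, False, 'AAAAAAAAA')
--     """
--     if not mismatch_list:
--         return True, False, "".join(seq_list)
--     valid = True
--     corrected = False
--     res = []
--     for index, seq in enumerate(seq_list):
--         if seq not in raw_list[index]: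
--             if seq not in mismatch_list[index]:
--                 valid = False
--                 res.append("")
--             else:
--                 corrected = True
--                 res.append(mismatch_list[index][seq])
--         else:
--             res.append(seq)
--
--     return valid, corrected, "".join(res)
-- ===== SOURCE B (Python) =====
-- def check_seq_mismatch(seq_list, raw_list, mismatch_list):
--     if not mismatch_list:
--         return True, False, "".join(seq_list)
--     valid = all(seq in raw_list[i] or seq in mismatch_list[i]
--                 for i, seq in enumerate(seq_list))
--     corrected = any(seq not in raw_list[i] and seq in mismatch_list[i]
--                     for i, seq in enumerate(seq_list))
--     res = "".join(seq if seq in raw_list[i]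
--                   else (mismatch_list[i][seq] if seq in mismatch_list[i] else "")
--                   for i, seq in enumerate(seq_list))
--     return valid, corrected, res
-- ===== Notes on version B (the rewrite author's own statement) =====
-- stated objective: simpler
-- what changed: Replaces A's single accumulating loop with three mutable state variables by three independent short-circuiting reductions (all / any / join over generator expressions), one per output component.
import Mathlib
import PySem

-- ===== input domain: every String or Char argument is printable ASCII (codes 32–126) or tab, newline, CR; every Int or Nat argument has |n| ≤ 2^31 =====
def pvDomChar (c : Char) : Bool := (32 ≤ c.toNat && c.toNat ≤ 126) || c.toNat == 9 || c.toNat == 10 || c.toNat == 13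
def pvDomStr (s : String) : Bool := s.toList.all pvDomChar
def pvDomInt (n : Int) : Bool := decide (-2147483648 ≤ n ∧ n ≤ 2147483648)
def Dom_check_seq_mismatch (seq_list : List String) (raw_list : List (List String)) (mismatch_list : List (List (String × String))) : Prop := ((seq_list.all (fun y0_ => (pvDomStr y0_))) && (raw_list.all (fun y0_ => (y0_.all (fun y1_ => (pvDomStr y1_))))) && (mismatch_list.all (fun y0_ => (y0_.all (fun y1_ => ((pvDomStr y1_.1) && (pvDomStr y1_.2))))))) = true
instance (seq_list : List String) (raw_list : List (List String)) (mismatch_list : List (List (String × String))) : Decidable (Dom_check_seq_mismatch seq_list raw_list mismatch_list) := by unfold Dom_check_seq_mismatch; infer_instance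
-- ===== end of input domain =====

-- B replaces A's single accumulating loop (three mutable state variables) by three
-- independent reductions — all / any / join — one per output component (objective: simpler).

-- ===== PORT A =====
-- List indexing raw_list[index] / mismatch_list[index] raises IndexError in Python when out
-- of range; Pre_check_seq_mismatch excludes exactly those inputs, so getD's default is never
-- reached on admitted inputs.  Indices from enumerate are ≥ 0, so .toNat is exact.
def check_seq_mismatch (seq_list : List String) (raw_list : List (List String)) (mismatch_list : List (List (String × String))) : Bool × Bool × String :=
  if mismatch_list.isEmpty then (true, false, String.join seq_list)
  else
    let st := (PySem.List.enumerate seq_list).foldl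
      (fun (st : Bool × Bool × List String) (p : Int × String) =>
        if !((raw_list.getD p.1.toNat []).contains p.2) then
          if ((PySem.Dict.mk (mismatch_list.getD p.1.toNat [])).get? p.2).isNone then
            (false, st.2.1, st.2.2 ++ [""])
          else
            (st.1, true, st.2.2 ++ [((PySem.Dict.mk (mismatch_list.getD p.1.toNat [])).get? p.2).getD ""])
        else (st.1, st.2.1, st.2.2 ++ [p.2]))
      (true, false, ([] : List String))
    (st.1, st.2.1, String.join st.2.2)

-- ===== PORT B =====
def check_seq_mismatch_alt (seq_list : List String) (raw_list : List (List String)) (mismatch_list : List (List (String × String))) : Bool × Bool × String :=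
  if mismatch_list.isEmpty then (true, false, String.join seq_list)
  else
    let valid := (PySem.List.enumerate seq_list).all
      (fun p => (raw_list.getD p.1.toNat []).contains p.2 || ((PySem.Dict.mk (mismatch_list.getD p.1.toNat [])).get? p.2).isSome)
    let corrected := (PySem.List.enumerate seq_list).any
      (fun p => !((raw_list.getD p.1.toNat []).contains p.2) && ((PySem.Dict.mk (mismatch_list.getD p.1.toNat [])).get? p.2).isSome)
    let res := String.join ((PySem.List.enumerate seq_list).map
      (fun p => if (raw_list.getD p.1.toNat []).contains p.2 then p.2
                else ((PySem.Dict.mk (mismatch_list.getD p.1.toNat [])).get? p.2).getD ""))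
    (valid, corrected, res)

-- ===== PRECONDITION & SPEC =====
-- Pre_ excludes exactly the inputs on which the Python A raises IndexError: when
-- mismatch_list is nonempty, A indexes raw_list[i] for every i < len(seq_list), and
-- mismatch_list[i] for exactly those i where seq_list[i] is not in raw_list[i].
def Pre_check_seq_mismatch (seq_list : List String) (raw_list : List (List String)) (mismatch_list : List (List (String × String))) : Prop :=
  mismatch_list = [] ∨
    (seq_list.length ≤ raw_list.length ∧
     ∀ i : Nat, i < seq_list.length →
       ((raw_list.getD i []).contains (seq_list.getD i "") = true ∨ i < mismatch_list.length))
instance (seq_list : List String) (raw_list : List (List String)) (mismatch_list : List (List (String × String))) : Decidable (Pre_check_seq_mismatch seq_list raw_list mismatch_list) := by unfold Pre_check_seq_mismatch; infer_instance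

def pvWitness_check_seq_mismatch : List String × List (List String) × (List (List (String × String))) :=
  (["ATA"], [["AAA"]], [[("ATA", "AAA")]])

def Spec_check_seq_mismatch (seq_list : List String) (raw_list : List (List String)) (mismatch_list : List (List (String × String))) (out : Bool × Bool × String) : Prop := out = check_seq_mismatch_alt seq_list raw_list mismatch_list
instance (seq_list : List String) (raw_list : List (List String)) (mismatch_list : List (List (String × String))) (out : Bool × Bool × String) : Decidable (Spec_check_seq_mismatch seq_list raw_list mismatch_list out) := by unfold Spec_check_seq_mismatch; infer_instance

-- ===== CLAIM (what is proved, stated in full; the proofs are below) =====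
def Claim_equal_check_seq_mismatch : Prop := ∀ (seq_list : List String) (raw_list : List (List String)) (mismatch_list : List (List (String × String))), Dom_check_seq_mismatch seq_list raw_list mismatch_list → Pre_check_seq_mismatch seq_list raw_list mismatch_list → Spec_check_seq_mismatch seq_list raw_list mismatch_list (check_seq_mismatch seq_list raw_list mismatch_list)

-- ===== LEMMAS AND PROOFS =====

-- A's fused loop equals the three independent reductions, for any pair list and any
-- starting accumulator state.
theorem csm_fold_eq (raw_list : List (List String)) (mismatch_list : List (List (String × String)))
    (l : List (Int × String)) (v c : Bool) (acc : List String) :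
    l.foldl
      (fun (st : Bool × Bool × List String) (p : Int × String) =>
        if !((raw_list.getD p.1.toNat []).contains p.2) then
          if ((PySem.Dict.mk (mismatch_list.getD p.1.toNat [])).get? p.2).isNone then
            (false, st.2.1, st.2.2 ++ [""])
          else
            (st.1, true, st.2.2 ++ [((PySem.Dict.mk (mismatch_list.getD p.1.toNat [])).get? p.2).getD ""])
        else (st.1, st.2.1, st.2.2 ++ [p.2]))
      (v, c, acc)
    = (v && l.all (fun p => (raw_list.getD p.1.toNat []).contains p.2 || ((PySem.Dict.mk (mismatch_list.getD p.1.toNat [])).get? p.2).isSome),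
       c || l.any (fun p => !((raw_list.getD p.1.toNat []).contains p.2) && ((PySem.Dict.mk (mismatch_list.getD p.1.toNat [])).get? p.2).isSome),
       acc ++ l.map (fun p => if (raw_list.getD p.1.toNat []).contains p.2 then p.2
                              else ((PySem.Dict.mk (mismatch_list.getD p.1.toNat [])).get? p.2).getD "")) := by
  induction l generalizing v c acc with
  | nil => simp
  | cons p t ih =>
    by_cases hraw : p.2 ∈ raw_list[p.1.toNat]?.getD []
    · rw [List.foldl_cons, if_neg (by simp [hraw]), ih]
      simp [hraw]
    · cases hget : (PySem.Dict.mk (mismatch_list[p.1.toNat]?.getD [])).get? p.2 with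
      | none =>
        rw [List.foldl_cons, if_pos (by simp [hraw]), if_pos (by simp [hget]), ih]
        simp [hraw, hget]
      | some w =>
        rw [List.foldl_cons, if_pos (by simp [hraw]), if_neg (by simp [hget]), ih]
        simp [hraw, hget]

-- ===== VERDICT (by name: the statement is the Claim_ definition above) =====
theorem check_seq_mismatch_spec : Claim_equal_check_seq_mismatch := by
  intro seq_list raw_list mismatch_list _ _
  unfold Spec_check_seq_mismatch check_seq_mismatch check_seq_mismatch_alt
  by_cases h : mismatch_list.isEmpty
  · simp [h]
  · simp only [h, if_false, Bool.false_eq_true]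
    rw [csm_fold_eq]
    simp
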